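-- pv_equiv track=rewrite | github.com/scdekov/lottery | lottery/tests/conftest.py | get_looser_numbers
-- ===== SOURCE A (Python) =====
-- def get_looser_numbers(winning_numbers, count):
--     n = 1
--     looser_numbers = []
--     while len(looser_numbers) < count:
--         if n not in winning_numbers:
--             looser_numbers.append(n)
--         n += 1
--     return looser_numbers
-- ===== SOURCE B (Python) =====
-- def get_looser_numbers(winning_numbers, count):
--     if count <= 0:
--         return []
--     limit = count + len(winning_numbers)
--     return sorted(set(range(1, limit + 1)) - set(winning_numbers))[:count]
-- ===== Notes on version B (the rewrite author's own statement) =====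
-- stated objective: faster
-- what changed: Replaced the incremental while/append loop (with a linear membership test per candidate) by materialising the bounded universe range(1, count+len(winning_numbers)+1) as a set, subtracting set(winning_numbers), sorting and slicing the first count elements.
import Mathlib
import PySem

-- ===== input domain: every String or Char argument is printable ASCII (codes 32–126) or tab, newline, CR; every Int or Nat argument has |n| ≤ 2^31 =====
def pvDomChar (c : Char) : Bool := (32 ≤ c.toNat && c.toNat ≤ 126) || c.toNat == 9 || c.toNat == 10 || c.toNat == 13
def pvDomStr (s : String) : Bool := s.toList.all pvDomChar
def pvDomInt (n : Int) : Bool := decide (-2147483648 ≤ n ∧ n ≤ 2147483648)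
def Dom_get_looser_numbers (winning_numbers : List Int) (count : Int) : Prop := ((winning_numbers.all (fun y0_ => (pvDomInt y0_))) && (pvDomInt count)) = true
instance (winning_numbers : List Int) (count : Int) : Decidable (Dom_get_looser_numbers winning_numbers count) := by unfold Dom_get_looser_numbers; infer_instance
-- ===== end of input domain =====

-- B replaces A's incremental while/append loop by a bounded universe, a set difference, a sort and a slice (asymptotically faster).

-- ===== PORT A =====
-- A's while loop, as fuel recursion over the same state (n, looser_numbers);
-- count.toNat + winning_numbers.length iterations always suffice (proved in pvLoopA_eq below), so the port is exact.
def pvLoopA (w : List Int) (count : Int) : Nat → Int → List Int → List Int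
  | 0, _, acc => acc
  | fuel+1, n, acc =>
    if (acc.length : Int) < count then
      if n ∈ w then pvLoopA w count fuel (n+1) acc
      else pvLoopA w count fuel (n+1) (acc ++ [n])
    else acc

def get_looser_numbers (winning_numbers : List Int) (count : Int) : List Int :=
  pvLoopA winning_numbers count (count.toNat + winning_numbers.length) 1 []

-- ===== PORT B =====
def get_looser_numbers_alt (winning_numbers : List Int) (count : Int) : List Int :=
  if count ≤ 0 then []
  else
    PySem.List.slice
      (PySem.List.sorted
        (PySem.Set.diff
          (PySem.Set.ofList (PySem.List.pyRange 1 (count + (winning_numbers.length : Int) + 1) 1))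
          winning_numbers)
        (fun x => x) false)
      none (some count)

-- ===== PRECONDITION & SPEC =====
def Spec_get_looser_numbers (winning_numbers : List Int) (count : Int) (out : List Int) : Prop := out = get_looser_numbers_alt winning_numbers count
instance (winning_numbers : List Int) (count : Int) (out : List Int) : Decidable (Spec_get_looser_numbers winning_numbers count out) := by unfold Spec_get_looser_numbers; infer_instance

-- ===== CLAIM (what is proved, stated in full; the proofs are below) =====
def Claim_equal_get_looser_numbers : Prop := ∀ (winning_numbers : List Int) (count : Int), Dom_get_looser_numbers winning_numbers count → Spec_get_looser_numbers winning_numbers count (get_looser_numbers winning_numbers count)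

-- ===== LEMMAS AND PROOFS =====

-- A's loop, run with fuel covering the whole range [n, n+fuel), appends exactly the
-- non-winning numbers of that range, up to the still-missing count.
theorem pvLoopA_eq (w : List Int) (count : Int) :
    ∀ (fuel : Nat) (n : Int) (acc : List Int),
      count - acc.length ≤ ((PySem.List.pyRange n (n + fuel) 1).filter (fun x => x ∉ w)).length →
      pvLoopA w count fuel n acc
        = acc ++ ((PySem.List.pyRange n (n + fuel) 1).filter (fun x => x ∉ w)).take (count - acc.length).toNat := by
  intro fuel
  induction fuel with
  | zero =>
    intro n acc _
    rw [PySem.List.pyRange_one_eq_nil (by omega)]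
    simp [pvLoopA]
  | succ fuel ih =>
    intro n acc h
    by_cases hcnt : (acc.length : Int) < count
    · rw [PySem.List.pyRange_one_cons (by push_cast; omega)] at h ⊢
      have hrange : n + 1 + (fuel : Int) = n + ((fuel : Nat) + 1 : Nat) := by push_cast; ring
      by_cases hmem : n ∈ w
      · simp only [pvLoopA, if_pos hcnt, if_pos hmem]
        rw [List.filter_cons_of_neg (by simp [hmem])] at h ⊢
        rw [← hrange] at h ⊢
        exact ih (n + 1) acc h
      · simp only [pvLoopA, if_pos hcnt, if_neg hmem]
        rw [List.filter_cons_of_pos (by simp [hmem])] at h ⊢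
        rw [← hrange] at h ⊢
        simp only [List.length_cons] at h
        rw [ih (n + 1) (acc ++ [n]) (by simp only [List.length_append, List.length_cons, List.length_nil]; push_cast; omega)]
        have hnat : (count - acc.length).toNat = (count - ((acc ++ [n]).length : Int)).toNat + 1 := by
          simp only [List.length_append, List.length_cons, List.length_nil]; push_cast; omega
        rw [hnat, List.take_succ_cons, List.append_assoc]
        simp
    · simp only [pvLoopA, if_neg hcnt]
      have : (count - acc.length).toNat = 0 := by omega
      simp [this]

-- a nodup list has at most w.length elements belonging to w
theorem pvFilter_mem_length_le (w r : List Int) (hr : r.Nodup) :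
    (r.filter (fun x => x ∈ w)).length ≤ w.length := by
  have hnd : (r.filter (fun x => x ∈ w)).Nodup := hr.filter _
  have hsub : r.filter (fun x => x ∈ w) ⊆ w := by
    intro x hx
    have := List.mem_filter.mp hx
    simpa using this.2
  exact (hnd.subperm hsub).length_le

-- the range 1 .. count+len(w) contains at least count non-winning numbers
theorem pvEnough (w : List Int) (count : Int) :
    count ≤ (((PySem.List.pyRange 1 (1 + ((count.toNat + w.length : Nat) : Int)) 1).filter (fun x => x ∉ w)).length : Int) := by
  set r := PySem.List.pyRange 1 (1 + ((count.toNat + w.length : Nat) : Int)) 1 with hrdef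
  have hlen : r.length = count.toNat + w.length := by
    rw [hrdef, PySem.List.length_pyRange_one]; omega
  have hsplit : (r.filter (fun x => x ∈ w)).length + (r.filter (fun x => ¬ (x ∈ w))).length = r.length := by
    simpa using (List.length_eq_length_filter_add (l := r) (fun x => decide (x ∈ w))).symm
  have hmemle := pvFilter_mem_length_le w r (by rw [hrdef]; exact PySem.List.nodup_pyRange_one 1 _)
  have : count.toNat ≤ (r.filter (fun x => ¬ (x ∈ w))).length := by omega
  calc count ≤ (count.toNat : Int) := by omega
    _ ≤ _ := by exact_mod_cast this

-- B's sorted set difference IS the ascending filter of the range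
theorem pvAltEq (w : List Int) (count : Int) (hc : ¬ count ≤ 0) :
    get_looser_numbers_alt w count
      = ((PySem.List.pyRange 1 (1 + ((count.toNat + w.length : Nat) : Int)) 1).filter (fun x => x ∉ w)).take count.toNat := by
  unfold get_looser_numbers_alt
  rw [if_neg hc]
  have hb : count + (w.length : Int) + 1 = 1 + ((count.toNat + w.length : Nat) : Int) := by push_cast; omega
  rw [hb]
  set r := PySem.List.pyRange 1 (1 + ((count.toNat + w.length : Nat) : Int)) 1 with hrdef
  have hnd : r.Nodup := by rw [hrdef]; exact PySem.List.nodup_pyRange_one 1 _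
  have hofList : PySem.Set.ofList r = r := by
    exact PySem.Set.ofList_eq_self_of_nodup _ hnd
  rw [hofList]
  have hdiff : PySem.Set.diff r w = r.filter (fun x => x ∉ w) := by
    unfold PySem.Set.diff
    apply List.filter_congr
    intro x _
    simp [PySem.Set.contains_eq_listContains]
  rw [hdiff]
  have hpw : (r.filter (fun x => x ∉ w)).Pairwise (fun a b => a < b) :=
    List.Pairwise.filter _ (by rw [hrdef]; exact PySem.List.pairwise_lt_pyRange_one 1 _)
  rw [PySem.List.sorted_eq_self_of_pairwise _ _ (hpw.imp le_of_lt)]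
  have hcount : (some count : Option Int) = some ((count.toNat : Nat) : Int) := by
    congr 1; omega
  rw [hcount, PySem.List.slice_to_natCast]

-- ===== VERDICT (by name: the statement is the Claim_ definition above) =====
theorem get_looser_numbers_spec : Claim_equal_get_looser_numbers := by
  intro w count _
  unfold Spec_get_looser_numbers get_looser_numbers
  by_cases hc : count ≤ 0
  · have h0 : pvLoopA w count (count.toNat + w.length) 1 []
        = [] ++ ((PySem.List.pyRange 1 (1 + ((count.toNat + w.length : Nat) : Int)) 1).filter (fun x => x ∉ w)).take (count - ([] : List Int).length).toNat := by
      exact pvLoopA_eq w count (count.toNat + w.length) 1 [] (by simp; omega)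
    simp only [List.length_nil, Int.natCast_zero, sub_zero] at h0
    rw [h0]
    unfold get_looser_numbers_alt
    rw [if_pos hc]
    have : count.toNat = 0 := by omega
    simp [this]
  · have h0 := pvLoopA_eq w count (count.toNat + w.length) 1 []
      (by simpa using pvEnough w count)
    simp only [List.length_nil, Int.natCast_zero, sub_zero, List.nil_append] at h0
    rw [h0, pvAltEq w count hc]
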